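-- pv_equiv track=rewrite | github.com/cristianBrianLFW/Leetcode | python/medium/2536. Increment Submatrices by One/main.py | rangeAddQueries4
-- ===== SOURCE A (Python) =====
-- from typing import List
--
-- def rangeAddQueries4(n: int, queries: List[List[int]]) -> List[List[int]]:
--
--     # criar matriz e preencher com 0 // melhor versão e a mais clara também
--
--     m = []
--
--     for i in range ( n + 1 ):
--         L = []
--         for j in range ( n + 1):
--             L.append ( 0 )
--         m.append ( L )
--
--     # marcar os valores dos queries na matriz
--
--     for query in queries:
--         r1 = query [ 0 ]
--         c1 = query [ 1 ]
--         r2 = query [ 2 ]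
--         c2 = query [ 3 ]
--
--         m [ r1 ][ c1 ] += 1
--         m [ r1 ][ c2 + 1] -= 1
--         m [ r2 + 1][ c1 ] -= 1
--         m [ r2 + 1 ][ c2 + 1 ] += 1
--
--     #prefix horizontal
--
--     for i in range ( n + 1 ):
--         for j in range ( 1, n + 1):
--             m [ i ][ j ] +=  m [ i ][ j - 1]
--
--     # prefix vertical
--
--     for i in range ( 1, n + 1 ):
--         for j in range ( n + 1):
--             m [ i ][ j ] += m [ i - 1][ j ]
--
--     m2 = []
--
--     for i in range ( n ):
--         L2 = []
--         for j in range ( n ):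
--             L2.append ( m [ i ][ j ])
--         m2.append ( L2 )
--
--     return m2
-- ===== SOURCE B (Python) =====
-- from typing import List
--
-- def rangeAddQueries4(n: int, queries: List[List[int]]) -> List[List[int]]:
--     # direct per-cell accumulation: increment every cell of each query's submatrix
--     result = [[0] * n for _ in range(n)]
--     for q in queries:
--         r1, c1, r2, c2 = q[0], q[1], q[2], q[3]
--         for i in range(r1, r2 + 1):
--             for j in range(c1, c2 + 1):
--                 result[i][j] += 1
--     return result
-- ===== Notes on version B (the rewrite author's own statement) =====
-- stated objective: simpler
-- what changed: Replaces the (n+1)x(n+1) padded 2D difference table with four corner marks, two in-place prefix-sum sweeps and a trimming copy by a direct n x n matrix where each query increments every cell of its own submatrix.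
-- outside the precondition, e.g. on rangeAddQueries4(2, [[-1, 0, 0, 0]]): A returns [[0, 0], [-1, 0]], B returns [[1, 0], [1, 0]]
import Mathlib
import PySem

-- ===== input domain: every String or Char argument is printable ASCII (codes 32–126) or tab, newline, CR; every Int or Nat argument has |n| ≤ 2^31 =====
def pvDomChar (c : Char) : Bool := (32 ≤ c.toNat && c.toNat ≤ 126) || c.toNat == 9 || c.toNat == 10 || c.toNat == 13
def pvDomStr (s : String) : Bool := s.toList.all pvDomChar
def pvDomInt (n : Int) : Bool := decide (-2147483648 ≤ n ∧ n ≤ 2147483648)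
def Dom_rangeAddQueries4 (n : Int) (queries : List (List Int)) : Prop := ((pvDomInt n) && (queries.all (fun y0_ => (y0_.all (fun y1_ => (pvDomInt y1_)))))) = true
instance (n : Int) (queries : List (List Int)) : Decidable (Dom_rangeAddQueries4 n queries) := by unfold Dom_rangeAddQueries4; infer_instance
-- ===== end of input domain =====

-- B replaces A's padded difference table + two prefix-sum sweeps + trim with a direct n×n matrix
-- where each query increments every cell of its submatrix (simpler; not claimed faster).


-- ===== PORT A =====
-- shared primitive: Python's `row[j] = f(row[j])` (negative index wraps; out of range Python
-- raises IndexError — there we return the list unchanged; such inputs are excluded by Pre_).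
def pyModifyRow (row : List Int) (j : Int) (f : Int → Int) : List Int :=
  let j' := if j < 0 then j + row.length else j
  if 0 ≤ j' ∧ j' < (row.length : Int) then row.modify j'.toNat f else row

-- Python's `m[i][j] = f(m[i][j])` on a list of rows, same convention as pyModifyRow.
def pyModify2 (m : List (List Int)) (i j : Int) (f : Int → Int) : List (List Int) :=
  let i' := if i < 0 then i + m.length else i
  if 0 ≤ i' ∧ i' < (m.length : Int) then m.modify i'.toNat (fun row => pyModifyRow row j f) else m

-- Python's `m[i][j]` read (in range on every input Pre_ admits; default 0 elsewhere).
def pyGet2 (m : List (List Int)) (i j : Int) : Int :=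
  PySem.List.pyGetD (PySem.List.pyGetD m i []) j 0

def rangeAddQueries4 (n : Int) (queries : List (List Int)) : List (List Int) :=
  -- build the (n+1)×(n+1) zero matrix by the two append loops
  let m := (PySem.List.pyRange 0 (n + 1)).foldl (fun m _ =>
      m ++ [(PySem.List.pyRange 0 (n + 1)).foldl (fun L _ => L ++ [(0 : Int)]) []]) []
  -- mark the queries (query[k] is in range under Pre_)
  let m := queries.foldl (fun m query =>
      let r1 := PySem.List.pyGetD query 0 0
      let c1 := PySem.List.pyGetD query 1 0
      let r2 := PySem.List.pyGetD query 2 0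
      let c2 := PySem.List.pyGetD query 3 0
      let m := pyModify2 m r1 c1 (· + 1)
      let m := pyModify2 m r1 (c2 + 1) (· - 1)
      let m := pyModify2 m (r2 + 1) c1 (· - 1)
      pyModify2 m (r2 + 1) (c2 + 1) (· + 1)) m
  -- prefix horizontal
  let m := (PySem.List.pyRange 0 (n + 1)).foldl (fun m i =>
      (PySem.List.pyRange 1 (n + 1)).foldl (fun m j =>
        pyModify2 m i j (· + pyGet2 m i (j - 1))) m) m
  -- prefix vertical
  let m := (PySem.List.pyRange 1 (n + 1)).foldl (fun m i =>
      (PySem.List.pyRange 0 (n + 1)).foldl (fun m j =>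
        pyModify2 m i j (· + pyGet2 m (i - 1) j)) m) m
  -- trim to n×n
  (PySem.List.pyRange 0 n).foldl (fun m2 i =>
      m2 ++ [(PySem.List.pyRange 0 n).foldl (fun L2 j => L2 ++ [pyGet2 m i j]) []]) []

-- ===== PORT B =====
def rangeAddQueries4_alt (n : Int) (queries : List (List Int)) : List (List Int) :=
  -- [[0] * n for _ in range(n)]  ([0]*n is empty for n ≤ 0, as Python's list repetition)
  let result := (PySem.List.pyRange 0 n).map (fun _ => List.replicate n.toNat (0 : Int))
  queries.foldl (fun result q =>
    let r1 := PySem.List.pyGetD q 0 0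
    let c1 := PySem.List.pyGetD q 1 0
    let r2 := PySem.List.pyGetD q 2 0
    let c2 := PySem.List.pyGetD q 3 0
    (PySem.List.pyRange r1 (r2 + 1)).foldl (fun result i =>
      (PySem.List.pyRange c1 (c2 + 1)).foldl (fun result j =>
        pyModify2 result i j (· + 1)) result) result) result

-- ===== PRECONDITION & SPEC =====
-- Pre_ restricts to the problem's natural domain (each query [r1,c1,r2,c2] with
-- 0 ≤ r1 ≤ r2+1, r2 < n, 0 ≤ c1 ≤ c2+1, c2 < n — possibly-empty rectangles inside the grid;
-- n < 0 only with no queries): outside it A either raises IndexError or returns values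
-- produced by negative-index wraparound / inverted ranges in its padded table, which no
-- implementation of the task would specify.
def Pre_rangeAddQueries4 (n : Int) (queries : List (List Int)) : Prop :=
  (0 ≤ n ∨ queries = []) ∧ ∀ q ∈ queries, 4 ≤ q.length ∧
    0 ≤ q.getD 0 0 ∧ 0 ≤ q.getD 2 0 ∧ q.getD 0 0 ≤ q.getD 2 0 + 1 ∧ q.getD 2 0 < n ∧
    0 ≤ q.getD 1 0 ∧ 0 ≤ q.getD 3 0 ∧ q.getD 1 0 ≤ q.getD 3 0 + 1 ∧ q.getD 3 0 < n
instance (n : Int) (queries : List (List Int)) : Decidable (Pre_rangeAddQueries4 n queries) := by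
  unfold Pre_rangeAddQueries4; infer_instance

def pvWitness_rangeAddQueries4 : Int × List (List Int) := (2, [[0, 0, 1, 1], [1, 0, 1, 0]])

def Spec_rangeAddQueries4 (n : Int) (queries : List (List Int)) (out : List (List Int)) : Prop := out = rangeAddQueries4_alt n queries
instance (n : Int) (queries : List (List Int)) (out : List (List Int)) : Decidable (Spec_rangeAddQueries4 n queries out) := by unfold Spec_rangeAddQueries4; infer_instance

-- ===== CLAIM (what is proved, stated in full; the proofs are below) =====
def Claim_equal_rangeAddQueries4 : Prop := ∀ (n : Int) (queries : List (List Int)), Dom_rangeAddQueries4 n queries → Pre_rangeAddQueries4 n queries → Spec_rangeAddQueries4 n queries (rangeAddQueries4 n queries)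

-- ===== LEMMAS AND PROOFS =====

-- `m` represents the nn×nn matrix of entries `φ`.
def MatModel (nn : ℕ) (m : List (List Int)) (φ : ℕ → ℕ → Int) : Prop :=
  m.length = nn ∧ (∀ i, i < nn → (m.getD i []).length = nn) ∧
    (∀ i j, i < nn → j < nn → (m.getD i []).getD j 0 = φ i j)

-- pointwise update at one cell
def upd2 (φ : ℕ → ℕ → Int) (i0 j0 : ℕ) (f : Int → Int) : ℕ → ℕ → Int :=
  fun a b => if a = i0 ∧ b = j0 then f (φ a b) else φ a b

-- row prefix sums / column prefix sums of the entry function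
def Hsum (φ : ℕ → ℕ → Int) (i j : ℕ) : Int := ∑ k ∈ Finset.range (j + 1), φ i k
def Vsum (φ : ℕ → ℕ → Int) (i j : ℕ) : Int := ∑ a ∈ Finset.range (i + 1), φ a j

-- the four difference marks of one query, on the entry function
def markOne (φ : ℕ → ℕ → Int) (q : List Int) : ℕ → ℕ → Int :=
  upd2 (upd2 (upd2 (upd2 φ (q.getD 0 0).toNat (q.getD 1 0).toNat (· + 1))
      (q.getD 0 0).toNat ((q.getD 3 0).toNat + 1) (· - 1))
      ((q.getD 2 0).toNat + 1) (q.getD 1 0).toNat (· - 1))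
      ((q.getD 2 0).toNat + 1) ((q.getD 3 0).toNat + 1) (· + 1)

-- +1 on the query's submatrix, on the entry function
def rectQ (q : List Int) (a b : ℕ) : Int :=
  if (q.getD 0 0).toNat ≤ a ∧ a ≤ (q.getD 2 0).toNat ∧
     (q.getD 1 0).toNat ≤ b ∧ b ≤ (q.getD 3 0).toNat then 1 else 0

lemma model_congr {nn : ℕ} {m : List (List Int)} {φ ψ : ℕ → ℕ → Int}
    (h : MatModel nn m φ) (he : ∀ a b, a < nn → b < nn → φ a b = ψ a b) : MatModel nn m ψ := by
  refine ⟨h.1, h.2.1, fun i j hi hj => ?_⟩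
  rw [h.2.2 i j hi hj, he i j hi hj]

lemma length_pyModifyRow (row : List Int) (j : Int) (f : Int → Int) :
    (pyModifyRow row j f).length = row.length := by
  unfold pyModifyRow; split_ifs <;> (dsimp only; split <;> simp)

lemma pyModifyRow_getD (row : List Int) {j : Int} (f : Int → Int)
    (hj0 : 0 ≤ j) (hj : j.toNat < row.length) (b : ℕ) (hb : b < row.length) :
    (pyModifyRow row j f).getD b 0 = if b = j.toNat then f (row.getD b 0) else row.getD b 0 := by
  have hnn : ¬ j < 0 := by omega
  have hjr : (0 ≤ j ∧ j < (row.length : Int)) := ⟨hj0, by omega⟩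
  unfold pyModifyRow
  simp only [hnn, if_false, if_pos hjr]
  have hb' : b < (row.modify j.toNat f).length := by simpa using hb
  rw [List.getD_eq_getElem _ 0 hb', List.getElem_modify]
  rw [List.getD_eq_getElem _ 0 hb]
  by_cases hbj : b = j.toNat
  · subst hbj; simp
  · simp [hbj, Ne.symm hbj]

lemma model_unique {nn : ℕ} {m m' : List (List Int)} {φ : ℕ → ℕ → Int}
    (h : MatModel nn m φ) (h' : MatModel nn m' φ) : m = m' := by
  have hlen : m.length = m'.length := h.1.trans h'.1.symm
  refine List.ext_getElem hlen (fun i h1 h2 => ?_)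
  have hi : i < nn := h.1 ▸ h1
  rw [← List.getD_eq_getElem m [] h1, ← List.getD_eq_getElem m' [] h2]
  refine List.ext_getElem ?_ (fun j j1 j2 => ?_)
  · rw [h.2.1 i hi, h'.2.1 i hi]
  · have hj : j < nn := by rw [h.2.1 i hi] at j1; exact j1
    rw [← List.getD_eq_getElem _ 0 j1, ← List.getD_eq_getElem _ 0 j2,
      h.2.2 i j hi hj, h'.2.2 i j hi hj]

lemma model_map (nn : ℕ) (φ : ℕ → ℕ → Int) :
    MatModel nn ((List.range nn).map (fun a => (List.range nn).map (fun b => φ a b))) φ := by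
  refine ⟨by simp, fun i hi => ?_, fun i j hi hj => ?_⟩
  · have h1 : i < ((List.range nn).map (fun a => (List.range nn).map (fun b => φ a b))).length := by
      simpa using hi
    rw [List.getD_eq_getElem _ [] h1]; simp
  · have h1 : i < ((List.range nn).map (fun a => (List.range nn).map (fun b => φ a b))).length := by
      simpa using hi
    rw [List.getD_eq_getElem _ [] h1]
    simp [hj]

lemma model_modify {nn : ℕ} {m : List (List Int)} {φ : ℕ → ℕ → Int} (h : MatModel nn m φ)
    {i j : Int} (f : Int → Int) (hi0 : 0 ≤ i) (hi : i.toNat < nn) (hj0 : 0 ≤ j) (hj : j.toNat < nn) :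
    MatModel nn (pyModify2 m i j f) (upd2 φ i.toNat j.toNat f) := by
  have hnn : ¬ i < 0 := by omega
  have hil : (i : Int) < (m.length : Int) := by
    rw [h.1]; omega
  have hir : (0 ≤ i ∧ i < (m.length : Int)) := ⟨hi0, hil⟩
  unfold pyModify2
  simp only [hnn, if_false, if_pos hir]
  have hlen : (m.modify i.toNat (fun row => pyModifyRow row j f)).length = nn := by
    simpa using h.1
  have hget : ∀ a : ℕ, a < nn →
      (m.modify i.toNat (fun row => pyModifyRow row j f)).getD a [] =
        if i.toNat = a then pyModifyRow (m.getD a []) j f else m.getD a [] := by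
    intro a ha
    have ha1 : a < (m.modify i.toNat (fun row => pyModifyRow row j f)).length := by omega
    have ha2 : a < m.length := by rw [h.1]; exact ha
    rw [List.getD_eq_getElem _ [] ha1, List.getElem_modify]
    rw [List.getD_eq_getElem m [] ha2]
  refine ⟨hlen, fun a ha => ?_, fun a b ha hb => ?_⟩
  · rw [hget a ha]
    split
    · rw [length_pyModifyRow]; exact h.2.1 a ha
    · exact h.2.1 a ha
  · rw [hget a ha]
    have hrl : (m.getD a []).length = nn := h.2.1 a ha
    by_cases hia : i.toNat = a
    · rw [if_pos hia]
      rw [pyModifyRow_getD _ f hj0 (by omega) b (by omega)]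
      unfold upd2
      subst hia
      rw [h.2.2 _ _ ha hb]
      by_cases hbj : b = j.toNat
      · rw [if_pos hbj, if_pos ⟨rfl, hbj⟩]
      · rw [if_neg hbj, if_neg (by tauto)]
    · rw [if_neg hia]
      unfold upd2
      have : ¬ (a = i.toNat ∧ b = j.toNat) := by
        rintro ⟨h1, _⟩; exact hia h1.symm
      rw [if_neg this, h.2.2 a b ha hb]

lemma model_get {nn : ℕ} {m : List (List Int)} {φ : ℕ → ℕ → Int} (h : MatModel nn m φ)
    {i j : Int} (hi0 : 0 ≤ i) (hi : i.toNat < nn) (hj0 : 0 ≤ j) (hj : j.toNat < nn) :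
    pyGet2 m i j = φ i.toNat j.toNat := by
  unfold pyGet2
  rw [PySem.List.pyGetD_of_nonneg m [] hi0, PySem.List.pyGetD_of_nonneg _ 0 hj0]
  exact h.2.2 _ _ hi hj


-- the per-query constraint Pre_ imposes (proof-side name for Pre_'s body)
def OkQ (n : Int) (q : List Int) : Prop :=
  4 ≤ q.length ∧
    0 ≤ q.getD 0 0 ∧ 0 ≤ q.getD 2 0 ∧ q.getD 0 0 ≤ q.getD 2 0 + 1 ∧ q.getD 2 0 < n ∧
    0 ≤ q.getD 1 0 ∧ 0 ≤ q.getD 3 0 ∧ q.getD 1 0 ≤ q.getD 3 0 + 1 ∧ q.getD 3 0 < n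

lemma model_init (n : Int) (hn : 0 ≤ n) :
    MatModel (n.toNat + 1)
      ((PySem.List.pyRange 0 (n + 1)).foldl (fun m _ =>
        m ++ [(PySem.List.pyRange 0 (n + 1)).foldl (fun L _ => L ++ [(0 : Int)]) []]) [])
      (fun _ _ => 0) := by
  have hlen : (PySem.List.pyRange 0 (n + 1)).length = n.toNat + 1 := by
    rw [PySem.List.length_pyRange_one]; omega
  have hinner : (PySem.List.pyRange 0 (n + 1)).foldl (fun L _ => L ++ [(0 : Int)]) [] =
      (PySem.List.pyRange 0 (n + 1)).map (fun _ => (0 : Int)) := by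
    simp
  have houter : ∀ (c : List Int),
      (PySem.List.pyRange 0 (n + 1)).foldl (fun m (_ : Int) => m ++ [c]) [] =
      (PySem.List.pyRange 0 (n + 1)).map (fun _ => c) := by
    intro c
    simp
  rw [hinner, houter]
  refine ⟨by simp [hlen], fun i hi => ?_, fun i j hi hj => ?_⟩
  · rw [List.getD_eq_getElem _ [] (by simp [hlen]; omega)]
    simp [hlen]
  · rw [List.getD_eq_getElem _ [] (by simp [hlen]; omega)]
    simp only [List.getElem_map]
    rw [List.getD_eq_getElem _ 0 (by simp [hlen]; omega)]
    simp

lemma model_marks (n : Int) (hn : 0 ≤ n) :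
    ∀ (qs : List (List Int)) (m : List (List Int)) (φ : ℕ → ℕ → Int),
      (∀ q ∈ qs, OkQ n q) → MatModel (n.toNat + 1) m φ →
      MatModel (n.toNat + 1)
        (qs.foldl (fun m query =>
          let r1 := PySem.List.pyGetD query 0 0
          let c1 := PySem.List.pyGetD query 1 0
          let r2 := PySem.List.pyGetD query 2 0
          let c2 := PySem.List.pyGetD query 3 0
          let m := pyModify2 m r1 c1 (· + 1)
          let m := pyModify2 m r1 (c2 + 1) (· - 1)
          let m := pyModify2 m (r2 + 1) c1 (· - 1)
          pyModify2 m (r2 + 1) (c2 + 1) (· + 1)) m)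
        (qs.foldl markOne φ) := by
  intro qs
  induction qs with
  | nil => intro m φ h hm; simpa using hm
  | cons q qs ih =>
    intro m φ h hm
    simp only [List.foldl_cons]
    refine ih _ _ (fun q' h' => h q' (List.mem_cons_of_mem _ h')) ?_
    obtain ⟨hlen4, h0, h20, h02, h2, h1, h30, h13, h3⟩ := h q List.mem_cons_self
    simp only [PySem.List.pyGetD_ofNat']
    have m1 := model_modify (i := q.getD 0 0) (j := q.getD 1 0) hm
      ((· + 1) : Int → Int) h0 (by omega) h1 (by omega)
    have m2 := model_modify (i := q.getD 0 0) (j := q.getD 3 0 + 1) m1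
      ((· - 1) : Int → Int) h0 (by omega) (by omega) (by omega)
    have m3 := model_modify (i := q.getD 2 0 + 1) (j := q.getD 1 0) m2
      ((· - 1) : Int → Int) (by omega) (by omega) h1 (by omega)
    have m4 := model_modify (i := q.getD 2 0 + 1) (j := q.getD 3 0 + 1) m3
      ((· + 1) : Int → Int) (by omega) (by omega) (by omega) (by omega)
    have e2 : ((q.getD 2 0) + 1).toNat = (q.getD 2 0).toNat + 1 := by omega
    have e3 : ((q.getD 3 0) + 1).toNat = (q.getD 3 0).toNat + 1 := by omega
    rw [e2, e3] at m4
    rw [e3] at m2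
    rw [e2] at m3
    exact m4

lemma foldH_row (n : Int) (i : Int) (hi0 : 0 ≤ i) (hi : i.toNat < n.toNat + 1) (φ : ℕ → ℕ → Int) :
    ∀ (t : ℕ), 1 ≤ t → t ≤ n.toNat + 1 → ∀ m, MatModel (n.toNat + 1) m φ →
      MatModel (n.toNat + 1)
        ((PySem.List.pyRange 1 (t : Int)).foldl
          (fun m j => pyModify2 m i j (· + pyGet2 m i (j - 1))) m)
        (fun a b => if a = i.toNat ∧ b < t then Hsum φ a b else φ a b) := by
  intro t ht1
  induction t, ht1 using Nat.le_induction with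
  | base =>
    intro ht2 m hm
    rw [show ((1 : ℕ) : Int) = 1 from rfl, PySem.List.pyRange_one_eq_nil (le_refl 1)]
    simp only [List.foldl_nil]
    refine model_congr hm (fun a b ha hb => ?_)
    by_cases hc : a = i.toNat ∧ b < 1
    · have hb0 : b = 0 := by omega
      subst hb0
      rw [if_pos hc]
      simp [Hsum]
    · rw [if_neg hc]
  | succ t ht ih =>
    intro ht2 m hm
    have ih' := ih (by omega) m hm
    rw [show (((t + 1 : ℕ)) : Int) = (t : Int) + 1 from by push_cast; ring]
    rw [PySem.List.pyRange_one_succ_right (by exact_mod_cast ht)]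
    rw [List.foldl_append]
    simp only [List.foldl_cons, List.foldl_nil]
    set M := (PySem.List.pyRange 1 ((t : Int))).foldl
      (fun m j => pyModify2 m i j (· + pyGet2 m i (j - 1))) m with hM
    have et : ((t : Int)).toNat = t := by omega
    have et1 : ((t : Int) - 1).toNat = t - 1 := by omega
    have hread : pyGet2 M i ((t : Int) - 1) = Hsum φ i.toNat (t - 1) := by
      rw [model_get ih' hi0 hi (by omega : (0:Int) ≤ (t : Int) - 1) (by rw [et1]; omega)]
      rw [et1, if_pos ⟨rfl, by omega⟩]
    have hmod := model_modify ih' (· + pyGet2 M i ((t : Int) - 1)) hi0 hi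
      (by omega : (0:Int) ≤ (t : Int)) (by rw [et]; omega)
    rw [et] at hmod
    refine model_congr hmod (fun a b ha hb => ?_)
    simp only [upd2]
    by_cases hc : a = i.toNat ∧ b = t
    · obtain ⟨ha', hb'⟩ := hc
      rw [if_pos (show a = i.toNat ∧ b = t from ⟨ha', hb'⟩),
        if_neg (show ¬(a = i.toNat ∧ b < t) from by omega), hread,
        if_pos (show a = i.toNat ∧ b < t + 1 from ⟨ha', by omega⟩)]
      rw [ha', hb']
      unfold Hsum
      rw [show t - 1 + 1 = t from by omega, Finset.sum_range_succ]
      ring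
    · rw [if_neg hc]
      by_cases hd : a = i.toNat ∧ b < t
      · rw [if_pos hd, if_pos ⟨hd.1, by omega⟩]
      · have hd2 : ¬(a = i.toNat ∧ b < t + 1) := by
          rintro ⟨x1, x2⟩
          rcases Nat.lt_succ_iff_lt_or_eq.mp x2 with hx | hx
          · exact hd ⟨x1, hx⟩
          · exact hc ⟨x1, hx⟩
        rw [if_neg hd, if_neg hd2]

lemma foldH (n : Int) (hn : 0 ≤ n) (φ : ℕ → ℕ → Int) :
    ∀ (s : ℕ), s ≤ n.toNat + 1 → ∀ m, MatModel (n.toNat + 1) m φ →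
      MatModel (n.toNat + 1)
        ((PySem.List.pyRange 0 (s : Int)).foldl (fun m i =>
          (PySem.List.pyRange 1 (n + 1)).foldl
            (fun m j => pyModify2 m i j (· + pyGet2 m i (j - 1))) m) m)
        (fun a b => if a < s then Hsum φ a b else φ a b) := by
  intro s
  induction s with
  | zero =>
    intro hs m hm
    rw [show ((0 : ℕ) : Int) = 0 from rfl, PySem.List.pyRange_one_eq_nil (le_refl 0)]
    simp only [List.foldl_nil]
    exact model_congr hm (fun a b ha hb => by rw [if_neg (by omega)])
  | succ s ih =>
    intro hs m hm
    have ih' := ih (by omega) m hm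
    rw [show (((s + 1 : ℕ)) : Int) = (s : Int) + 1 from by push_cast; ring,
      PySem.List.pyRange_one_succ_right (a := 0) (b := (s : Int)) (by exact_mod_cast Nat.zero_le s),
      List.foldl_append]
    simp only [List.foldl_cons, List.foldl_nil]
    set M := (PySem.List.pyRange 0 ((s : Int))).foldl (fun m i =>
      (PySem.List.pyRange 1 (n + 1)).foldl
        (fun m j => pyModify2 m i j (· + pyGet2 m i (j - 1))) m) m with hM
    have hcast : (((n.toNat + 1 : ℕ)) : Int) = n + 1 := by omega
    have es : ((s : Int)).toNat = s := by omega
    have hrow := foldH_row n (s : Int) (by omega) (by omega)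
      (fun a b => if a < s then Hsum φ a b else φ a b) (n.toNat + 1) (by omega) (le_refl _) M ih'
    rw [hcast] at hrow
    rw [es] at hrow
    refine model_congr hrow (fun a b ha hb => ?_)
    dsimp only
    by_cases has : a = s
    · subst has
      rw [if_pos ⟨rfl, hb⟩, if_pos (by omega : a < a + 1)]
      unfold Hsum
      refine Finset.sum_congr rfl (fun k _ => ?_)
      simp
    · rw [if_neg (by rintro ⟨x, -⟩; exact has x)]
      by_cases hlt : a < s
      · rw [if_pos hlt, if_pos (by omega)]
      · rw [if_neg hlt, if_neg (by omega)]

lemma foldV_row (n : Int) (i : Int) (hi1 : 1 ≤ i) (hi : i.toNat < n.toNat + 1) (ψ : ℕ → ℕ → Int) :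
    ∀ (t : ℕ), t ≤ n.toNat + 1 → ∀ m, MatModel (n.toNat + 1) m ψ →
      MatModel (n.toNat + 1)
        ((PySem.List.pyRange 0 (t : Int)).foldl
          (fun m j => pyModify2 m i j (· + pyGet2 m (i - 1) j)) m)
        (fun a b => if a = i.toNat ∧ b < t then ψ a b + ψ (i.toNat - 1) b else ψ a b) := by
  intro t
  induction t with
  | zero =>
    intro ht2 m hm
    rw [show ((0 : ℕ) : Int) = 0 from rfl, PySem.List.pyRange_one_eq_nil (le_refl 0)]
    simp only [List.foldl_nil]
    exact model_congr hm (fun a b ha hb => by rw [if_neg (by omega)])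
  | succ t ih =>
    intro ht2 m hm
    have ih' := ih (by omega) m hm
    rw [show (((t + 1 : ℕ)) : Int) = (t : Int) + 1 from by push_cast; ring,
      PySem.List.pyRange_one_succ_right (by exact_mod_cast Nat.zero_le t), List.foldl_append]
    simp only [List.foldl_cons, List.foldl_nil]
    set M := (PySem.List.pyRange 0 ((t : Int))).foldl
      (fun m j => pyModify2 m i j (· + pyGet2 m (i - 1) j)) m with hM
    have et : ((t : Int)).toNat = t := by omega
    have ei : ((i - 1)).toNat = i.toNat - 1 := by omega
    have hread : pyGet2 M (i - 1) (t : Int) = ψ (i.toNat - 1) t := by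
      rw [model_get ih' (by omega : (0:Int) ≤ i - 1) (by omega) (by omega : (0:Int) ≤ (t : Int))
        (by rw [et]; omega)]
      rw [et, ei, if_neg (by omega)]
    have hmod := model_modify ih' (· + pyGet2 M (i - 1) (t : Int)) (by omega : (0:Int) ≤ i) hi
      (by omega : (0:Int) ≤ (t : Int)) (by rw [et]; omega)
    rw [et] at hmod
    refine model_congr hmod (fun a b ha hb => ?_)
    simp only [upd2]
    by_cases hc : a = i.toNat ∧ b = t
    · obtain ⟨ha', hb'⟩ := hc
      rw [if_pos (show a = i.toNat ∧ b = t from ⟨ha', hb'⟩),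
        if_neg (show ¬(a = i.toNat ∧ b < t) from by omega), hread,
        if_pos (show a = i.toNat ∧ b < t + 1 from ⟨ha', by omega⟩)]
      rw [ha', hb']
    · rw [if_neg hc]
      by_cases hd : a = i.toNat ∧ b < t
      · rw [if_pos hd, if_pos ⟨hd.1, by omega⟩]
      · have hd2 : ¬(a = i.toNat ∧ b < t + 1) := by
          rintro ⟨x1, x2⟩
          rcases Nat.lt_succ_iff_lt_or_eq.mp x2 with hx | hx
          · exact hd ⟨x1, hx⟩
          · exact hc ⟨x1, hx⟩
        rw [if_neg hd, if_neg hd2]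

lemma foldV (n : Int) (hn : 0 ≤ n) (ψ : ℕ → ℕ → Int) :
    ∀ (s : ℕ), 1 ≤ s → s ≤ n.toNat + 1 → ∀ m, MatModel (n.toNat + 1) m ψ →
      MatModel (n.toNat + 1)
        ((PySem.List.pyRange 1 (s : Int)).foldl (fun m i =>
          (PySem.List.pyRange 0 (n + 1)).foldl
            (fun m j => pyModify2 m i j (· + pyGet2 m (i - 1) j)) m) m)
        (fun a b => if a < s then Vsum ψ a b else ψ a b) := by
  intro s hs1
  induction s, hs1 using Nat.le_induction with
  | base =>
    intro hs2 m hm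
    rw [show ((1 : ℕ) : Int) = 1 from rfl, PySem.List.pyRange_one_eq_nil (le_refl 1)]
    simp only [List.foldl_nil]
    refine model_congr hm (fun a b ha hb => ?_)
    by_cases hc : a < 1
    · have ha0 : a = 0 := by omega
      subst ha0
      rw [if_pos hc]
      simp [Vsum]
    · rw [if_neg hc]
  | succ s hs ih =>
    intro hs2 m hm
    have ih' := ih (by omega) m hm
    rw [show (((s + 1 : ℕ)) : Int) = (s : Int) + 1 from by push_cast; ring,
      PySem.List.pyRange_one_succ_right (a := 1) (b := (s : Int)) (by exact_mod_cast hs),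
      List.foldl_append]
    simp only [List.foldl_cons, List.foldl_nil]
    set M := (PySem.List.pyRange 1 ((s : Int))).foldl (fun m i =>
      (PySem.List.pyRange 0 (n + 1)).foldl
        (fun m j => pyModify2 m i j (· + pyGet2 m (i - 1) j)) m) m with hM
    have hcast : (((n.toNat + 1 : ℕ)) : Int) = n + 1 := by omega
    have es : ((s : Int)).toNat = s := by omega
    have hrow := foldV_row n (s : Int) (by exact_mod_cast hs) (by omega)
      (fun a b => if a < s then Vsum ψ a b else ψ a b) (n.toNat + 1) (le_refl _) M ih'
    rw [hcast] at hrow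
    rw [es] at hrow
    refine model_congr hrow (fun a b ha hb => ?_)
    dsimp only
    by_cases has : a = s
    · subst has
      rw [if_pos ⟨rfl, hb⟩, if_neg (by omega : ¬ a < a), if_pos (by omega : a - 1 < a),
        if_pos (by omega : a < a + 1)]
      unfold Vsum
      rw [show a - 1 + 1 = a from by omega, Finset.sum_range_succ]
      ring
    · rw [if_neg (by rintro ⟨x, -⟩; exact has x)]
      by_cases hlt : a < s
      · rw [if_pos hlt, if_pos (by omega)]
      · rw [if_neg hlt, if_neg (by omega)]

lemma trim_eq (n : Int) (_hn : 0 ≤ n) (m : List (List Int)) (φ : ℕ → ℕ → Int)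
    (h : MatModel (n.toNat + 1) m φ) :
    (PySem.List.pyRange 0 n).foldl (fun m2 i =>
        m2 ++ [(PySem.List.pyRange 0 n).foldl (fun L2 j => L2 ++ [pyGet2 m i j]) []]) [] =
      (List.range n.toNat).map (fun a => (List.range n.toNat).map (fun b => φ a b)) := by
  have hmap2 : ∀ (i : Int), (PySem.List.pyRange 0 n).foldl
      (fun L2 j => L2 ++ [pyGet2 m i j]) [] =
      (PySem.List.pyRange 0 n).map (fun j => pyGet2 m i j) := fun i => by
    simpa using PySem.List.foldl_append_singleton_eq_map (fun j => pyGet2 m i j)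
      (PySem.List.pyRange 0 n) []
  calc (PySem.List.pyRange 0 n).foldl (fun m2 i =>
        m2 ++ [(PySem.List.pyRange 0 n).foldl (fun L2 j => L2 ++ [pyGet2 m i j]) []]) []
      = (PySem.List.pyRange 0 n).foldl (fun m2 i =>
        m2 ++ [(PySem.List.pyRange 0 n).map (fun j => pyGet2 m i j)]) [] := by
        simp only [hmap2]
    _ = (PySem.List.pyRange 0 n).map (fun i => (PySem.List.pyRange 0 n).map
        (fun j => pyGet2 m i j)) := by
        simpa using PySem.List.foldl_append_singleton_eq_map
          (fun i => (PySem.List.pyRange 0 n).map (fun j => pyGet2 m i j))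
          (PySem.List.pyRange 0 n) []
    _ = (List.range n.toNat).map (fun a => (List.range n.toNat).map (fun b => φ a b)) := by
        rw [PySem.List.pyRange_one]
        simp only [sub_zero, List.map_map]
        refine List.map_congr_left (fun a hma => ?_)
        have ha : a < n.toNat := List.mem_range.mp hma
        dsimp only [Function.comp]
        refine List.map_congr_left (fun b hmb => ?_)
        have hb : b < n.toNat := List.mem_range.mp hmb
        dsimp only [Function.comp]
        rw [show (0 : Int) + (a : Int) = (a : Int) from by ring,
          show (0 : Int) + (b : Int) = (b : Int) from by ring]
        rw [model_get h (by omega) (by omega) (by omega) (by omega)]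
        simp

lemma A_characterization (n : Int) (queries : List (List Int)) (hn : 0 ≤ n)
    (hq : ∀ q ∈ queries, OkQ n q) :
    rangeAddQueries4 n queries =
      (List.range n.toNat).map (fun a => (List.range n.toNat).map (fun b =>
        Vsum (Hsum (queries.foldl markOne (fun _ _ => 0))) a b)) := by
  have hcast : (((n.toNat + 1 : ℕ)) : Int) = n + 1 := by omega
  have h0 := model_init n hn
  have h1 := model_marks n hn queries _ _ hq h0
  have h2 := foldH n hn _ (n.toNat + 1) (le_refl _) _ h1
  rw [hcast] at h2
  have h2' : MatModel (n.toNat + 1) _ (Hsum (queries.foldl markOne (fun _ _ => 0))) :=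
    model_congr h2 (fun a b ha hb => by rw [if_pos ha])
  have h3 := foldV n hn _ (n.toNat + 1) (by omega) (le_refl _) _ h2'
  rw [hcast] at h3
  have h3' : MatModel (n.toNat + 1) _
      (Vsum (Hsum (queries.foldl markOne (fun _ _ => 0)))) :=
    model_congr h3 (fun a b ha hb => by rw [if_pos ha])
  unfold rangeAddQueries4
  exact trim_eq n hn _ _ h3'

lemma foldB_seg (n : Int) (i : Int) (hi0 : 0 ≤ i) (hi : i.toNat < n.toNat)
    (c1 : Int) (hc1 : 0 ≤ c1) :
    ∀ (k : ℕ), c1 + k ≤ (n.toNat : Int) → ∀ m (ψ : ℕ → ℕ → Int), MatModel n.toNat m ψ →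
      MatModel n.toNat
        ((PySem.List.pyRange c1 (c1 + k)).foldl (fun m j => pyModify2 m i j (· + 1)) m)
        (fun a b => if a = i.toNat ∧ c1.toNat ≤ b ∧ b < c1.toNat + k then ψ a b + 1 else ψ a b) := by
  intro k
  induction k with
  | zero =>
    intro hk m ψ hm
    rw [show c1 + ((0 : ℕ) : Int) = c1 from by push_cast; ring,
      PySem.List.pyRange_one_eq_nil (le_refl c1)]
    simp only [List.foldl_nil]
    exact model_congr hm (fun a b ha hb => by rw [if_neg (by omega)])
  | succ k ih =>
    intro hk m ψ hm
    have ih' := ih (by omega) m ψ hm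
    rw [show c1 + (((k + 1 : ℕ)) : Int) = (c1 + (k : Int)) + 1 from by push_cast; ring,
      PySem.List.pyRange_one_succ_right (a := c1) (b := c1 + (k : Int)) (by omega),
      List.foldl_append]
    simp only [List.foldl_cons, List.foldl_nil]
    have hmod := model_modify (i := i) (j := c1 + (k : Int)) ih' ((· + 1) : Int → Int)
      hi0 hi (by omega) (by omega)
    rw [show ((c1 + (k : Int))).toNat = c1.toNat + k from by omega] at hmod
    refine model_congr hmod (fun a b ha hb => ?_)
    simp only [upd2]
    by_cases hc : a = i.toNat ∧ b = c1.toNat + k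
    · rw [if_pos hc, if_neg (by omega : ¬(a = i.toNat ∧ c1.toNat ≤ b ∧ b < c1.toNat + k)),
        if_pos (show a = i.toNat ∧ c1.toNat ≤ b ∧ b < c1.toNat + (k + 1) from by omega)]
    · rw [if_neg hc]
      by_cases hd : a = i.toNat ∧ c1.toNat ≤ b ∧ b < c1.toNat + k
      · rw [if_pos hd, if_pos (show a = i.toNat ∧ c1.toNat ≤ b ∧ b < c1.toNat + (k + 1) from by omega)]
      · have hd2 : ¬(a = i.toNat ∧ c1.toNat ≤ b ∧ b < c1.toNat + (k + 1)) := by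
          rintro ⟨x1, x2, x3⟩
          rcases (by omega : b < c1.toNat + k ∨ b = c1.toNat + k) with hx | hx
          · exact hd ⟨x1, x2, hx⟩
          · exact hc ⟨x1, hx⟩
        rw [if_neg hd, if_neg hd2]

lemma foldB_rect (n : Int) (q : List Int) (hq : OkQ n q) (r1 c1 r2 c2 : Int)
    (h1 : r1 = q.getD 0 0) (h2 : c1 = q.getD 1 0) (h3 : r2 = q.getD 2 0) (h4 : c2 = q.getD 3 0) :
    ∀ (k : ℕ), r1 + k ≤ r2 + 1 → ∀ m (ψ : ℕ → ℕ → Int), MatModel n.toNat m ψ →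
      MatModel n.toNat
        ((PySem.List.pyRange r1 (r1 + k)).foldl (fun m i =>
          (PySem.List.pyRange c1 (c2 + 1)).foldl (fun m j => pyModify2 m i j (· + 1)) m) m)
        (fun a b => if r1.toNat ≤ a ∧ a < r1.toNat + k ∧ c1.toNat ≤ b ∧ b ≤ c2.toNat
            then ψ a b + 1 else ψ a b) := by
  subst h1; subst h2; subst h3; subst h4
  obtain ⟨hlen4, h0, h20, h02, h2, h1, h30, h13, h3⟩ := hq
  intro k
  induction k with
  | zero =>
    intro hk m ψ hm
    rw [show (q.getD 0 0) + ((0 : ℕ) : Int) = q.getD 0 0 from by push_cast; ring,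
      PySem.List.pyRange_one_eq_nil (le_refl _)]
    simp only [List.foldl_nil]
    exact model_congr hm (fun a b ha hb => by rw [if_neg (by omega)])
  | succ k ih =>
    intro hk m ψ hm
    have ih' := ih (by omega) m ψ hm
    rw [show (q.getD 0 0) + (((k + 1 : ℕ)) : Int) = ((q.getD 0 0) + (k : Int)) + 1 from by
        push_cast; ring,
      PySem.List.pyRange_one_succ_right (a := q.getD 0 0) (b := (q.getD 0 0) + (k : Int))
        (by omega),
      List.foldl_append]
    simp only [List.foldl_cons, List.foldl_nil]
    -- the appended row r1 + k, filled by the inner column loop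
    have hk2 : (q.getD 1 0) + (((q.getD 3 0 + 1 - q.getD 1 0).toNat : ℕ) : Int) =
        q.getD 3 0 + 1 := by omega
    have hrow := foldB_seg n ((q.getD 0 0) + (k : Int)) (by omega)
      (by push_cast at hk; omega) (q.getD 1 0) h1 ((q.getD 3 0 + 1 - q.getD 1 0).toNat)
      (by omega) _ _ ih'
    rw [hk2] at hrow
    rw [show (((q.getD 0 0) + (k : Int))).toNat = (q.getD 0 0).toNat + k from by omega] at hrow
    refine model_congr hrow (fun a b ha hb => ?_)
    have hcc : (q.getD 1 0).toNat + (q.getD 3 0 + 1 - q.getD 1 0).toNat =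
        (q.getD 3 0).toNat + 1 := by omega
    rw [hcc]
    split_ifs <;> omega

lemma B_characterization (n : Int) (queries : List (List Int)) (hn : 0 ≤ n)
    (hq : ∀ q ∈ queries, OkQ n q) :
    MatModel n.toNat (rangeAddQueries4_alt n queries)
      (queries.foldl (fun ψ q => fun a b => ψ a b + rectQ q a b) (fun _ _ => 0)) := by
  have hinit : MatModel n.toNat
      ((PySem.List.pyRange 0 n).map (fun _ => List.replicate n.toNat (0 : Int)))
      (fun _ _ => 0) := by
    have hlen : (PySem.List.pyRange 0 n).length = n.toNat := by
      rw [PySem.List.length_pyRange_one]; omega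
    refine ⟨by simp [hlen], fun i hi => ?_, fun i j hi hj => ?_⟩
    · rw [List.getD_eq_getElem _ [] (by simp [hlen]; omega)]
      simp
    · rw [List.getD_eq_getElem _ [] (by simp [hlen]; omega)]
      simp only [List.getElem_map]
      rw [List.getD_replicate _ hj]
  have hfold : ∀ (qs : List (List Int)) (m : List (List Int)) (ψ : ℕ → ℕ → Int),
      (∀ q ∈ qs, OkQ n q) → MatModel n.toNat m ψ →
      MatModel n.toNat
        (qs.foldl (fun result q =>
          let r1 := PySem.List.pyGetD q 0 0
          let c1 := PySem.List.pyGetD q 1 0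
          let r2 := PySem.List.pyGetD q 2 0
          let c2 := PySem.List.pyGetD q 3 0
          (PySem.List.pyRange r1 (r2 + 1)).foldl (fun result i =>
            (PySem.List.pyRange c1 (c2 + 1)).foldl (fun result j =>
              pyModify2 result i j (· + 1)) result) result) m)
        (qs.foldl (fun ψ q => fun a b => ψ a b + rectQ q a b) ψ) := by
    intro qs
    induction qs with
    | nil => intro m ψ h hm; simpa using hm
    | cons q qs ih =>
      intro m ψ h hm
      simp only [List.foldl_cons]
      refine ih _ _ (fun q' h' => h q' (List.mem_cons_of_mem _ h')) ?_
      obtain ⟨hlen4, h0, h20, h02, h2, h1, h30, h13, h3⟩ := h q List.mem_cons_self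
      simp only [PySem.List.pyGetD_ofNat']
      have hk1 : (q.getD 0 0) + (((q.getD 2 0 + 1 - q.getD 0 0).toNat : ℕ) : Int) =
          q.getD 2 0 + 1 := by omega
      have hrect := foldB_rect n q (h q List.mem_cons_self) _ _ _ _ rfl rfl rfl rfl
        ((q.getD 2 0 + 1 - q.getD 0 0).toNat) (by omega) m ψ hm
      rw [hk1] at hrect
      refine model_congr hrect (fun a b ha hb => ?_)
      have hrr : (q.getD 0 0).toNat + (q.getD 2 0 + 1 - q.getD 0 0).toNat =
          (q.getD 2 0).toNat + 1 := by omega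
      rw [hrr]
      unfold rectQ
      split_ifs <;> omega
  unfold rangeAddQueries4_alt
  exact hfold queries _ _ hq hinit

lemma upd2_sub_eq_add (φ : ℕ → ℕ → Int) (i0 j0 : ℕ) :
    upd2 φ i0 j0 (· - 1) = upd2 φ i0 j0 (· + (-1)) := by
  funext x y; unfold upd2; split_ifs <;> ring

lemma FH_upd (φ : ℕ → ℕ → Int) (i0 j0 : ℕ) (v : Int) (a b : ℕ) :
    Vsum (Hsum (upd2 φ i0 j0 (· + v))) a b =
      Vsum (Hsum φ) a b + (if i0 ≤ a ∧ j0 ≤ b then v else 0) := by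
  have hH : ∀ x y, Hsum (upd2 φ i0 j0 (· + v)) x y =
      Hsum φ x y + (if x = i0 ∧ j0 ≤ y then v else 0) := by
    intro x y
    unfold Hsum upd2
    have hk : ∀ k, (if x = i0 ∧ k = j0 then φ x k + v else φ x k) =
        φ x k + (if x = i0 ∧ k = j0 then v else 0) := by
      intro k; split_ifs <;> simp
    rw [Finset.sum_congr rfl (fun k _ => hk k), Finset.sum_add_distrib]
    congr 1
    by_cases hx : x = i0
    · simp only [hx, true_and]
      rw [Finset.sum_ite_eq' (Finset.range (y + 1)) j0 (fun _ => v)]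
      simp [Finset.mem_range]
    · simp [hx]
  unfold Vsum
  rw [Finset.sum_congr rfl (fun x _ => hH x b), Finset.sum_add_distrib]
  congr 1
  by_cases hj : j0 ≤ b
  · simp only [hj, and_true]
    rw [Finset.sum_ite_eq' (Finset.range (a + 1)) i0 (fun _ => v)]
    simp [Finset.mem_range]
  · simp [hj]

lemma key_step (n : Int) (φ : ℕ → ℕ → Int) (q : List Int) (hq : OkQ n q) (a b : ℕ) :
    Vsum (Hsum (markOne φ q)) a b = Vsum (Hsum φ) a b + rectQ q a b := by
  unfold markOne
  rw [upd2_sub_eq_add, upd2_sub_eq_add, FH_upd, FH_upd, FH_upd, FH_upd]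
  unfold rectQ
  obtain ⟨-, h0, h20, h02, h2, h1, h30, h13, h3⟩ := hq
  have hr : (q.getD 0 0).toNat ≤ (q.getD 2 0).toNat + 1 := by omega
  have hc : (q.getD 1 0).toNat ≤ (q.getD 3 0).toNat + 1 := by omega
  split_ifs <;> omega

lemma key (n : Int) :
    ∀ (qs : List (List Int)) (φ ψ : ℕ → ℕ → Int), (∀ q ∈ qs, OkQ n q) →
      (∀ a b, Vsum (Hsum φ) a b = ψ a b) →
      ∀ a b, Vsum (Hsum (qs.foldl markOne φ)) a b =
        qs.foldl (fun ψ q => fun a b => ψ a b + rectQ q a b) ψ a b := by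
  intro qs
  induction qs with
  | nil => intro φ ψ h he a b; simpa using he a b
  | cons q qs ih =>
    intro φ ψ h he a b
    simp only [List.foldl_cons]
    refine ih (markOne φ q) _ (fun q' hm => h q' (List.mem_cons_of_mem _ hm)) ?_ a b
    intro a b
    rw [key_step n φ q (h q List.mem_cons_self) a b, he a b]

-- ===== VERDICT (by name: the statement is the Claim_ definition above) =====
theorem rangeAddQueries4_spec : Claim_equal_rangeAddQueries4 := by
  intro n queries _ hpre
  unfold Spec_rangeAddQueries4
  obtain ⟨hn0, hq⟩ := hpre
  by_cases hn : 0 ≤ n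
  case neg =>
    have hqe : queries = [] := hn0.resolve_left hn
    subst hqe
    have hA : rangeAddQueries4 n [] = [] := by
      unfold rangeAddQueries4
      rw [PySem.List.pyRange_one_eq_nil (show n + 1 ≤ 0 from by omega),
        PySem.List.pyRange_one_eq_nil (show n + 1 ≤ 1 from by omega),
        PySem.List.pyRange_one_eq_nil (show n ≤ 0 from by omega)]
      simp
    have hB : rangeAddQueries4_alt n [] = [] := by
      unfold rangeAddQueries4_alt
      rw [PySem.List.pyRange_one_eq_nil (show n ≤ 0 from by omega)]
      simp
    rw [hA, hB]
  case pos =>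
  have hq' : ∀ q ∈ queries, OkQ n q := fun q hqm => hq q hqm
  have hA := A_characterization n queries hn hq'
  have hB := B_characterization n queries hn hq'
  have hkey := key n queries (fun _ _ => 0)
    (fun _ _ => 0) hq' (by intro a b; simp [Vsum, Hsum])
  have hmap : (List.range n.toNat).map (fun a => (List.range n.toNat).map (fun b =>
      Vsum (Hsum (queries.foldl markOne (fun _ _ => 0))) a b)) =
      (List.range n.toNat).map (fun a => (List.range n.toNat).map (fun b =>
        queries.foldl (fun ψ q => fun a b => ψ a b + rectQ q a b) (fun _ _ => 0) a b)) := by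
    simp only [hkey]
  rw [hA, hmap]
  exact model_unique (model_map n.toNat _) hB
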